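-- pv_equiv track=rewrite | github.com/ShermanGu/Draw-Flow-Chart-by-ReactFlow | Parse/parse.py | conditional_split
-- ===== SOURCE A (Python) =====
-- def conditional_split(ele,strls):
--     re = []
--     window = len(ele)
--     rest = strls
--     start = 0
--     flag = 0
--     for i in range(len(strls)):
--         if strls[i:i+window] == ele and flag == 0:
--             re += [strls[start:i]]
--             start = i+window
--             rest = strls[i+window:]
--         elif strls[i] == '[':
--             flag += 1
--         elif strls[i] == ']':
--             flag -= 1
--     re += [rest]
--     return re
-- ===== SOURCE B (Python) =====
-- def conditional_split(ele, strls):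
--     # Different state: instead of remembering start indices and slicing the
--     # input, accumulate the current piece character by character in a buffer,
--     # with a skip counter for delimiter characters already consumed.
--     w = len(ele)
--     out = []
--     buf = []
--     depth = 0
--     skip = 0
--     for i in range(len(strls)):
--         c = strls[i]
--         if depth == 0 and strls.startswith(ele, i):
--             out.append(''.join(buf))
--             buf = []
--             skip = w
--         elif c == '[':
--             depth += 1
--         elif c == ']':
--             depth -= 1
--         if skip > 0:
--             skip -= 1
--         else:
--             buf.append(c)
--     out.append(''.join(buf))
--     return out
-- ===== Notes on version B (the rewrite author's own statement) =====
-- stated objective: alternative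
-- what changed: B drops A's start-index/slice bookkeeping entirely: it accumulates the current piece character by character in a buffer, emits the buffer at each depth-0 match (tested with str.startswith instead of building a fresh slice), and uses a skip counter for the delimiter characters already consumed.
import Mathlib
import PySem

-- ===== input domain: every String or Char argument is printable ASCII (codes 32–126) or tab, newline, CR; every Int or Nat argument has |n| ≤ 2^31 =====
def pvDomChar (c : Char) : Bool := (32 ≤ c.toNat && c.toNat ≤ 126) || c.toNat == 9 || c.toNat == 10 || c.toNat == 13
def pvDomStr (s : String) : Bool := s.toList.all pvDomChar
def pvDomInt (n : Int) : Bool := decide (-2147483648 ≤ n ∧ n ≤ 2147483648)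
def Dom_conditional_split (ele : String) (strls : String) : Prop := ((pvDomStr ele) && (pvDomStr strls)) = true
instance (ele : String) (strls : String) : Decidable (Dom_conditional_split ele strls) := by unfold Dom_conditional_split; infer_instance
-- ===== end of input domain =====

-- B replaces A's start-index/slice bookkeeping by a character buffer for the current
-- piece plus a skip counter for already-consumed delimiter characters (alternative
-- decomposition, same cost).

-- ===== PORT A =====
-- loop body of A, state (re, rest, start, flag)
def csStepA (ele strls : String) (st : List String × String × Int × Int) (i : Int) :
    List String × String × Int × Int :=
  if PySem.Str.slice strls (some i) (some (i + PySem.Str.len ele)) == ele && st.2.2.2 == 0 then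
    (st.1 ++ [PySem.Str.slice strls (some st.2.2.1) (some i)],
     PySem.Str.slice strls (some (i + PySem.Str.len ele)) none, i + PySem.Str.len ele, st.2.2.2)
  else if PySem.Str.pyGet? strls i == some '[' then
    (st.1, st.2.1, st.2.2.1, st.2.2.2 + 1)
  else if PySem.Str.pyGet? strls i == some ']' then
    (st.1, st.2.1, st.2.2.1, st.2.2.2 - 1)
  else st

def conditional_split (ele : String) (strls : String) : List String :=
  let st := (PySem.List.pyRange 0 (PySem.Str.len strls) 1).foldl (csStepA ele strls)
    ([], strls, 0, 0)
  st.1 ++ [st.2.1]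

-- ===== PORT B =====
-- loop body of B, state (out, buf, depth, skip); ''.join(buf) over single
-- characters is String.ofList; strls.startswith(ele, i) is ported by hand as a
-- prefix test on the dropped character list — exact for 0 ≤ i (all i here)
def csStepB (ele strls : String) (st : List String × List Char × Int × Int) (i : Int) :
    List String × List Char × Int × Int :=
  match PySem.Str.pyGet? strls i with
  | none => st  -- unreachable: i ranges over range(len(strls))
  | some c =>
    let st1 :=
      if st.2.2.1 == 0 && ele.toList.isPrefixOf (strls.toList.drop i.toNat) then
        (st.1 ++ [String.ofList st.2.1], ([] : List Char), st.2.2.1, PySem.Str.len ele)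
      else if c == '[' then (st.1, st.2.1, st.2.2.1 + 1, st.2.2.2)
      else if c == ']' then (st.1, st.2.1, st.2.2.1 - 1, st.2.2.2)
      else st
    if st1.2.2.2 > 0 then (st1.1, st1.2.1, st1.2.2.1, st1.2.2.2 - 1)
    else (st1.1, st1.2.1 ++ [c], st1.2.2.1, st1.2.2.2)

def conditional_split_alt (ele : String) (strls : String) : List String :=
  let st := (PySem.List.pyRange 0 (PySem.Str.len strls) 1).foldl (csStepB ele strls)
    ([], [], 0, 0)
  st.1 ++ [String.ofList st.2.1]

-- ===== PRECONDITION & SPEC =====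
def Spec_conditional_split (ele : String) (strls : String) (out : List String) : Prop := out = conditional_split_alt ele strls
instance (ele : String) (strls : String) (out : List String) : Decidable (Spec_conditional_split ele strls out) := by unfold Spec_conditional_split; infer_instance

-- ===== CLAIM (what is proved, stated in full; the proofs are below) =====
def Claim_equal_conditional_split : Prop := ∀ (ele : String) (strls : String), Dom_conditional_split ele strls → Spec_conditional_split ele strls (conditional_split ele strls)

-- ===== LEMMAS AND PROOFS =====

theorem pv_slice_eq_iff (ele strls : String) (k : Nat) :
    PySem.Str.slice strls (some (k : Int)) (some ((k : Int) + (ele.toList.length : Int))) = ele ↔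
      ele.toList <+: strls.toList.drop k := by
  rw [← String.toList_inj, PySem.Str.toList_slice, PySem.Chars.slice_eq_listSlice,
    PySem.List.slice_natCast_add]
  constructor
  · intro h; rw [← h]; exact List.take_prefix _ _
  · intro h
    rw [List.prefix_iff_eq_take] at h
    exact h.symm

theorem pv_slice_natCast (strls : String) (a b : Nat) :
    PySem.Str.slice strls (some (a : Int)) (some (b : Int)) =
      String.ofList ((strls.toList.drop a).take (b - a)) := by
  rw [← String.toList_inj, PySem.Str.toList_slice, PySem.Chars.slice_eq_listSlice,
    PySem.List.slice_natCast, String.toList_ofList]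

theorem pv_slice_from (strls : String) (a : Nat) :
    PySem.Str.slice strls (some (a : Int)) none = String.ofList (strls.toList.drop a) := by
  rw [← String.toList_inj, PySem.Str.toList_slice, PySem.Chars.slice_eq_listSlice,
    PySem.List.slice_from_natCast, String.toList_ofList]

-- the coupled simulation: A's fold from (re, strls[start:], start, flag) and B's fold
-- from (re, buf, flag, skip), over the same index suffix, end in states whose final
-- assembly agrees, provided buf/skip describe the piece A has open at position j
theorem pv_sim (ele strls : String) (m : Nat) :
    ∀ (j : Nat) (re : List String) (start : Nat) (flag skip : Int) (buf : List Char),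
      j + m = strls.toList.length →
      0 ≤ skip →
      (skip = 0 → start ≤ j ∧ buf = (strls.toList.drop start).take (j - start)) →
      (0 < skip → buf = [] ∧ (start : Int) = (j : Int) + skip) →
      (let fa := ((List.range' j m).map (Nat.cast : Nat → Int)).foldl (csStepA ele strls)
          (re, PySem.Str.slice strls (some (start : Int)) none, (start : Int), flag);
       let fb := ((List.range' j m).map (Nat.cast : Nat → Int)).foldl (csStepB ele strls)
          (re, buf, flag, skip);
       fa.1 ++ [fa.2.1] = fb.1 ++ [String.ofList fb.2.1]) := by
  induction m with
  | zero =>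
    intro j re start flag skip buf hjm hnn hs0 hsP
    simp only [List.range'_zero, List.map_nil, List.foldl_nil]
    rw [pv_slice_from]
    rcases eq_or_lt_of_le hnn with h0 | hP
    · obtain ⟨hle, hbuf⟩ := hs0 h0.symm
      have : strls.toList.drop start = (strls.toList.drop start).take (j - start) := by
        rw [List.take_of_length_le]
        rw [List.length_drop]
        omega
      rw [this, ← hbuf]
    · obtain ⟨hbuf, hst⟩ := hsP hP
      have hgt : strls.toList.length ≤ start := by omega
      rw [List.drop_eq_nil_of_le hgt, hbuf]
  | succ m ih =>
    intro j re start flag skip buf hjm hnn hs0 hsP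
    have hj : j < strls.toList.length := by omega
    rw [List.range'_succ, List.map_cons, List.foldl_cons, List.foldl_cons]
    have hget : PySem.Str.pyGet? strls ((j : Nat) : Int) = some strls.toList[j] := by
      rw [PySem.Str.pyGet?_eq, PySem.Chars.pyGet?_eq_listPyGet?, PySem.List.pyGet?_natCast]
      simp
    have htoNat : ((j : Nat) : Int).toNat = j := by omega
    -- the emitted piece, whether skip = 0 or not:
    have hpiece : PySem.Str.slice strls (some (start : Int)) (some (j : Int)) = String.ofList buf := by
      rw [pv_slice_natCast]
      rcases eq_or_lt_of_le hnn with h0 | hP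
      · obtain ⟨_, hbuf⟩ := hs0 h0.symm
        rw [hbuf]
      · obtain ⟨hbuf, hst⟩ := hsP hP
        have : j - start = 0 := by omega
        rw [this, List.take_zero, hbuf]
    by_cases hc : flag = 0 ∧ ele.toList <+: strls.toList.drop j
    · -- match at j
      have hcondA : (PySem.Str.slice strls (some ((j:Nat) : Int))
          (some (((j:Nat) : Int) + PySem.Str.len ele)) == ele && (flag == 0)) = true := by
        simp only [Bool.and_eq_true, beq_iff_eq]
        refine ⟨?_, hc.1⟩
        have hl : PySem.Str.len ele = ((ele.toList.length : Nat) : Int) := by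
          simp [PySem.Str.len]
        rw [hl]
        exact (pv_slice_eq_iff ele strls j).mpr hc.2
      have hcondB : ((flag == 0) && ele.toList.isPrefixOf (strls.toList.drop ((j:Nat):Int).toNat)) = true := by
        simp only [Bool.and_eq_true, beq_iff_eq, htoNat, List.isPrefixOf_iff_prefix]
        exact ⟨hc.1, hc.2⟩
      have hw : ele.toList.length ≤ strls.toList.length - j := by
        have := hc.2.length_le
        rw [List.length_drop] at this
        omega
      rw [csStepA, csStepB, hget]
      simp only [hcondA, hcondB, if_true]
      have hl : PySem.Str.len ele = ((ele.toList.length : Nat) : Int) := by simp [PySem.Str.len]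
      have hcast : ((j:Nat) : Int) + PySem.Str.len ele = (((j + ele.toList.length : Nat)) : Int) := by
        rw [hl]; push_cast; ring
      rw [hcast, hpiece]
      rcases Nat.eq_zero_or_pos ele.toList.length with hw0 | hwP
      · -- empty separator: skip set to 0, this char goes into the new buffer
        have hz : PySem.Str.len ele = 0 := by rw [hl, hw0]; rfl
        simp only [hw0, Nat.add_zero, hz, List.nil_append]
        exact ih (j + 1) (re ++ [String.ofList buf]) j flag 0 [strls.toList[j]]
          (by omega) le_rfl
          (by intro _
              refine ⟨by omega, ?_⟩
              have h1 : j + 1 - j = 1 := by omega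
              rw [h1, List.drop_eq_getElem_cons hj, List.take_succ_cons, List.take_zero])
          (by intro h; omega)
      · -- nonempty separator: skip = w, decremented once in this iteration
        have : (PySem.Str.len ele > 0) = True := by
          simp only [hl, gt_iff_lt, eq_iff_iff, iff_true]
          exact_mod_cast hwP
        simp only [this, if_true]
        have hdec : PySem.Str.len ele - 1 = (((ele.toList.length - 1 : Nat)) : Int) := by
          rw [hl]; omega
        rw [hdec]
        rcases Nat.eq_zero_or_pos (ele.toList.length - 1) with h1 | h2
        · exact ih (j + 1) (re ++ [String.ofList buf]) (j + ele.toList.length) flag _ []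
            (by omega) (by simp)
            (by intro h
                have h1' : ele.toList.length = 1 := by omega
                refine ⟨by omega, ?_⟩
                have hx : j + 1 - (j + ele.toList.length) = 0 := by omega
                rw [hx, List.take_zero])
            (by intro h; exact ⟨rfl, by omega⟩)
        · exact ih (j + 1) (re ++ [String.ofList buf]) (j + ele.toList.length) flag _ []
            (by omega) (by omega)
            (by intro h
                exfalso
                have : ((ele.toList.length - 1 : Nat) : Int) = 0 := h
                omega)
            (by intro _; refine ⟨rfl, by push_cast; omega⟩)
    · -- no match at j
      have hcondA : (PySem.Str.slice strls (some ((j:Nat) : Int))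
          (some (((j:Nat) : Int) + PySem.Str.len ele)) == ele && (flag == 0)) = false := by
        rw [Bool.and_eq_false_iff]
        by_cases hf : flag = 0
        · left
          rw [beq_eq_false_iff_ne]
          intro he
          have hl : PySem.Str.len ele = ((ele.toList.length : Nat) : Int) := by
            simp [PySem.Str.len]
          rw [hl] at he
          exact hc ⟨hf, (pv_slice_eq_iff ele strls j).mp he⟩
        · right; simpa using hf
      have hcondB : ((flag == 0) && ele.toList.isPrefixOf (strls.toList.drop ((j:Nat):Int).toNat)) = false := by
        rw [Bool.and_eq_false_iff]
        by_cases hf : flag = 0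
        · right
          rw [Bool.eq_false_iff]
          simp only [htoNat, List.isPrefixOf_iff_prefix, ne_eq]
          intro he
          exact hc ⟨hf, by simpa using he⟩
        · left; simpa using hf
      rw [csStepA, csStepB, hget]
      simp only [hcondA, hcondB, Bool.false_eq_true, if_false]
      -- the bracket branches only change flag, identically on both sides;
      -- abstract the updated flag and handle the skip stage once
      have hnext : ∀ flag' : Int,
          (let fa := ((List.range' (j+1) m).map (Nat.cast : Nat → Int)).foldl (csStepA ele strls)
              (re, PySem.Str.slice strls (some (start : Int)) none, (start : Int), flag');
           let fb := ((List.range' (j+1) m).map (Nat.cast : Nat → Int)).foldl (csStepB ele strls)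
              (if skip > 0 then (re, buf, flag', skip - 1)
               else (re, buf ++ [strls.toList[j]], flag', skip));
           fa.1 ++ [fa.2.1] = fb.1 ++ [String.ofList fb.2.1]) := by
        intro flag'
        rcases eq_or_lt_of_le hnn with h0 | hP
        · obtain ⟨hle, hbuf⟩ := hs0 h0.symm
          have : (skip > 0) = False := by simp [← h0]
          simp only [this, if_false]
          exact ih (j + 1) re start flag' skip (buf ++ [strls.toList[j]]) (by omega) hnn
            (by intro _
                refine ⟨by omega, ?_⟩
                rw [hbuf]
                have h1 : j + 1 - start = (j - start) + 1 := by omega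
                rw [h1, List.take_add_one]
                congr 1
                have : (strls.toList.drop start)[j - start]? = some strls.toList[j] := by
                  rw [List.getElem?_drop]
                  have : start + (j - start) = j := by omega
                  rw [this]
                  simp
                simp [this])
            (by intro h; omega)
        · obtain ⟨hbuf, hst⟩ := hsP hP
          have : (skip > 0) = True := by simp [hP]
          simp only [this, if_true]
          exact ih (j + 1) re start flag' (skip - 1) buf (by omega) (by omega)
            (by intro h
                refine ⟨by omega, ?_⟩
                have : j + 1 - start = 0 := by omega
                rw [this, List.take_zero, hbuf])
            (by intro h; exact ⟨hbuf, by omega⟩)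
      by_cases h1 : strls.toList[j] = '['
      · have e1 : (some strls.toList[j] == some '[') = true := by simp [h1]
        have e1' : (strls.toList[j] == '[') = true := by simp [h1]
        simp only [e1, e1', if_true]
        exact hnext (flag + 1)
      · have e1 : (some strls.toList[j] == some '[') = false := by simp [h1]
        have e1' : (strls.toList[j] == '[') = false := by simp [h1]
        simp only [e1, e1', Bool.false_eq_true, if_false]
        by_cases h2 : strls.toList[j] = ']'
        · have e2 : (some strls.toList[j] == some ']') = true := by simp [h2]
          have e2' : (strls.toList[j] == ']') = true := by simp [h2]
          simp only [e2, e2', if_true]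
          exact hnext (flag - 1)
        · have e2 : (some strls.toList[j] == some ']') = false := by simp [h2]
          have e2' : (strls.toList[j] == ']') = false := by simp [h2]
          simp only [e2, e2', Bool.false_eq_true, if_false]
          exact hnext flag

-- ===== VERDICT (by name: the statement is the Claim_ definition above) =====
theorem conditional_split_spec : Claim_equal_conditional_split := by
  intro ele strls _
  unfold Spec_conditional_split conditional_split conditional_split_alt
  simp only []
  have hlen : PySem.Str.len strls = ((strls.toList.length : Nat) : Int) := rfl
  rw [hlen, PySem.List.pyRange_zero_natCast]
  have hrange : List.range strls.toList.length = List.range' 0 strls.toList.length := by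
    rw [List.range_eq_range']
  have hmap : List.map (fun k => ((k : Nat) : Int)) (List.range strls.toList.length) =
      (List.range' 0 strls.toList.length).map (Nat.cast : Nat → Int) := by
    rw [hrange]
  rw [hmap]
  have h0 : PySem.Str.slice strls (some ((0 : Nat) : Int)) none = strls := by
    rw [pv_slice_from]
    simp
  have := pv_sim ele strls strls.toList.length 0 [] 0 0 0 []
    (by omega) le_rfl (by intro _; simp) (by intro h; omega)
  simp only [Nat.cast_zero] at this h0
  rw [h0] at this
  exact this
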